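-- pv_equiv track=rewrite | github.com/sjswuitchik/duck_comp_gen | 05_CompPopGen/aln_filter.py | countUniqIdentSeqs
-- ===== SOURCE A (Python) =====
-- def countUniqIdentSeqs(codon_seqs, gappy_seqs, post_stop_seqs):
-- # This function goes through every sequence in an alignment and counts how
-- # many sequences are unique or identical.
--
--     uniq_seqs, ident_seqs, found = 0, 0, [];
--     #codon_seq_list = list(codon_seqs.values());
--     codon_seq_list = [ codon_seqs[seq] for seq in codon_seqs if seq not in gappy_seqs + post_stop_seqs ]
--
--     for seq in codon_seq_list:
--         if codon_seq_list.count(seq) == 1: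
--             uniq_seqs += 1;
--         if codon_seq_list.count(seq) != 1 and seq not in found:
--             ident_seqs += 1;
--             found.append(seq);
--
--     return uniq_seqs, ident_seqs;
-- ===== SOURCE B (Python) =====
-- def countUniqIdentSeqs(codon_seqs, gappy_seqs, post_stop_seqs):
--     # One pass builds a frequency table of the kept sequences; a second pass
--     # over the table's values classifies each distinct sequence as unique
--     # (count 1) or identical (count > 1).  No repeated .count() rescans.
--     excluded = set(gappy_seqs + post_stop_seqs)
--     counts = {}
--     for seq in codon_seqs:
--         if seq not in excluded:
--             val = codon_seqs[seq]
--             counts[val] = counts.get(val, 0) + 1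
--     uniq_seqs, ident_seqs = 0, 0
--     for c in counts.values():
--         if c == 1:
--             uniq_seqs += 1
--         else:
--             ident_seqs += 1
--     return uniq_seqs, ident_seqs
-- ===== Notes on version B (the rewrite author's own statement) =====
-- stated objective: faster
-- what changed: Replaced A's per-element list.count() rescans, linear 'found' membership list and per-key scan of the concatenated exclusion list (quadratic) with a membership set for the exclusions plus a single pass building a frequency dict of the kept sequences, then one pass over the dict's values classifying each distinct sequence as unique (count 1) or identical (count > 1).
import Mathlib
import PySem

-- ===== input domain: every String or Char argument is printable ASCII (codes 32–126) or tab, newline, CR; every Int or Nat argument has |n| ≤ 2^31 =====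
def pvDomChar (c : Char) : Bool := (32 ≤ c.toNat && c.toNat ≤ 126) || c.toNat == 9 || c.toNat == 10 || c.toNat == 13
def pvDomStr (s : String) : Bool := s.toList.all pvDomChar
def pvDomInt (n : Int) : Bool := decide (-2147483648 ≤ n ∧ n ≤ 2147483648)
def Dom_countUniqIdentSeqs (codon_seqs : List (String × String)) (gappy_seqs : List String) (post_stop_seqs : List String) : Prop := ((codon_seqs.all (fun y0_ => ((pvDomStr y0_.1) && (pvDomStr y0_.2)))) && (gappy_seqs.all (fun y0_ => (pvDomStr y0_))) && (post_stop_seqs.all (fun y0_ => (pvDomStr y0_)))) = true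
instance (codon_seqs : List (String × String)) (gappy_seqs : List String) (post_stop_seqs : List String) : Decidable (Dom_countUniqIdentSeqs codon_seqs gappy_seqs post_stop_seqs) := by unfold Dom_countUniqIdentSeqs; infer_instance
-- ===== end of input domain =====

-- ===== PORT A =====
-- B improves on A by replacing the per-element .count() rescans (quadratic) with one
-- frequency dict built in a single pass; objective: faster (asymptotic O(n^2) -> O(n*m)).
-- Port of A. The dict comprehension `[codon_seqs[seq] for seq in codon_seqs if ...]`
-- iterates the dict's (unique) keys in insertion order; since keys are unique,
-- `codon_seqs[seq]` is exactly the item's value, so it is items.filter ... |>.map (·.2).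
def countUniqIdentSeqs (codon_seqs : List (String × String)) (gappy_seqs : List String) (post_stop_seqs : List String) : Int × Int :=
  let codon_seq_list : List String :=
    ((PySem.Dict.ofList codon_seqs).items.filter
        (fun kv => !((gappy_seqs ++ post_stop_seqs).contains kv.1))).map (·.2)
  let r := codon_seq_list.foldl
    (fun st seq =>
      let st1 := if codon_seq_list.count seq == 1 then (st.1 + 1, st.2.1, st.2.2) else st
      if (codon_seq_list.count seq != 1) && !st1.2.2.contains seq then
        (st1.1, st1.2.1 + 1, st1.2.2 ++ [seq])
      else st1)
    ((0 : Int), (0 : Int), ([] : List String))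
  (r.1, r.2.1)

-- ===== PORT B =====
def countUniqIdentSeqs_alt (codon_seqs : List (String × String)) (gappy_seqs : List String) (post_stop_seqs : List String) : Int × Int :=
  let excluded := PySem.Set.ofList (gappy_seqs ++ post_stop_seqs)
  let counts : PySem.Dict String Int :=
    (PySem.Dict.ofList codon_seqs).items.foldl
      (fun d kv =>
        if !excluded.contains kv.1 then d.insert kv.2 (d.getD kv.2 0 + 1) else d)
      PySem.Dict.empty
  counts.values.foldl
    (fun acc c => if c == 1 then (acc.1 + 1, acc.2) else (acc.1, acc.2 + 1))
    ((0 : Int), (0 : Int))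

-- ===== PRECONDITION & SPEC =====
def Spec_countUniqIdentSeqs (codon_seqs : List (String × String)) (gappy_seqs : List String) (post_stop_seqs : List String) (out : Int × Int) : Prop := out = countUniqIdentSeqs_alt codon_seqs gappy_seqs post_stop_seqs
instance (codon_seqs : List (String × String)) (gappy_seqs : List String) (post_stop_seqs : List String) (out : Int × Int) : Decidable (Spec_countUniqIdentSeqs codon_seqs gappy_seqs post_stop_seqs out) := by unfold Spec_countUniqIdentSeqs; infer_instance

-- ===== CLAIM (what is proved, stated in full; the proofs are below) =====
def Claim_equal_countUniqIdentSeqs : Prop := ∀ (codon_seqs : List (String × String)) (gappy_seqs : List String) (post_stop_seqs : List String), Dom_countUniqIdentSeqs codon_seqs gappy_seqs post_stop_seqs → Spec_countUniqIdentSeqs codon_seqs gappy_seqs post_stop_seqs (countUniqIdentSeqs codon_seqs gappy_seqs post_stop_seqs)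

-- ===== LEMMAS AND PROOFS =====

-- A's loop body and B's classification loop body, named for the proofs (defeq to the ports' lambdas).
def pvStepA (cl : List String) (st : Int × Int × List String) (seq : String) : Int × Int × List String :=
  let st1 := if cl.count seq == 1 then (st.1 + 1, st.2.1, st.2.2) else st
  if (cl.count seq != 1) && !st1.2.2.contains seq then (st1.1, st1.2.1 + 1, st1.2.2 ++ [seq])
  else st1

def pvStepB (acc : Int × Int) (c : Int) : Int × Int :=
  if c == 1 then (acc.1 + 1, acc.2) else (acc.1, acc.2 + 1)

-- The distinct not-yet-`found` elements of `l` whose whole-list count is ≠ 1, in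
-- first-occurrence order; mirrors the growth of A's `found` list.
def pvND (cl : List String) : List String → List String → List String
  | [], _ => []
  | x :: l, f =>
      if (cl.count x != 1) && !f.contains x then x :: pvND cl l (f ++ [x]) else pvND cl l f

theorem pvND_mem (cl : List String) : ∀ (l f : List String) (x : String),
    x ∈ pvND cl l f ↔ x ∈ l ∧ cl.count x ≠ 1 ∧ x ∉ f := by
  intro l
  induction l with
  | nil => simp [pvND]
  | cons y l ih =>
      intro f x
      by_cases hy : ((cl.count y != 1) && !f.contains y) = true
      · rw [pvND, if_pos hy]
        simp only [Bool.and_eq_true, bne_iff_ne, Bool.not_eq_true', List.contains_eq_mem,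
          decide_eq_false_iff_not] at hy
        simp only [List.mem_cons, ih]
        constructor
        · rintro (rfl | ⟨hxl, hc, hnf⟩)
          · exact ⟨Or.inl rfl, hy.1, hy.2⟩
          · simp only [List.mem_append, List.mem_singleton] at hnf
            exact ⟨Or.inr hxl, hc, fun h => hnf (Or.inl h)⟩
        · rintro ⟨hxmem, hc, hnf⟩
          by_cases hxy : x = y
          · exact Or.inl hxy
          · have hxl : x ∈ l := hxmem.resolve_left hxy
            refine Or.inr ⟨hxl, hc, ?_⟩
            simp only [List.mem_append, List.mem_singleton]
            rintro (h | h)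
            · exact hnf h
            · exact hxy h
      · rw [pvND, if_neg hy]
        simp only [Bool.and_eq_true, bne_iff_ne, Bool.not_eq_true', List.contains_eq_mem,
          decide_eq_false_iff_not, not_and_or, not_not] at hy
        simp only [List.mem_cons, ih]
        constructor
        · rintro ⟨hxl, hc, hnf⟩
          exact ⟨Or.inr hxl, hc, hnf⟩
        · rintro ⟨hxy | hxl, hc, hnf⟩
          · subst hxy
            rcases hy with h | h
            · exact absurd h hc
            · exact absurd h hnf
          · exact ⟨hxl, hc, hnf⟩

theorem pvND_nodup (cl : List String) : ∀ (l f : List String), (pvND cl l f).Nodup := by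
  intro l
  induction l with
  | nil => intro f; simp [pvND]
  | cons y l ih =>
      intro f
      by_cases hy : ((cl.count y != 1) && !f.contains y) = true
      · rw [pvND, if_pos hy]
        refine List.nodup_cons.mpr ⟨?_, ih _⟩
        intro hmem
        rcases (pvND_mem cl l (f ++ [y]) y).mp hmem with ⟨_, _, hnf⟩
        exact hnf (by simp)
      · rw [pvND, if_neg hy]; exact ih f

-- Characterisation of A's loop over the filtered list `cl`.
theorem pvLoopA (cl : List String) : ∀ (l : List String) (u i : Int) (f : List String),
    l.foldl (pvStepA cl) (u, i, f)
    = (u + (l.countP (fun x => cl.count x == 1) : Int),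
       i + ((pvND cl l f).length : Int), f ++ pvND cl l f) := by
  intro l
  induction l with
  | nil => intro u i f; simp [pvND]
  | cons y l ih =>
      intro u i f
      by_cases h1 : (cl.count y == 1) = true
      · have hc : cl.count y = 1 := beq_iff_eq.mp h1
        have hstep : pvStepA cl (u, i, f) y = (u + 1, i, f) := by simp [pvStepA, hc]
        have hcp : (y :: l).countP (fun x => cl.count x == 1)
            = l.countP (fun x => cl.count x == 1) + 1 := by simp [h1]
        have hnd : pvND cl (y :: l) f = pvND cl l f := by simp [pvND, hc]
        rw [List.foldl_cons, hstep, ih, hcp, hnd]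
        exact Prod.ext (by push_cast; ring) rfl
      · by_cases h2 : ((cl.count y != 1) && !f.contains y) = true
        · have hstep : pvStepA cl (u, i, f) y = (u, i + 1, f ++ [y]) := by
            simp only [pvStepA, h1, Bool.false_eq_true, if_false]
            rw [if_pos h2]
          have hcp : (y :: l).countP (fun x => cl.count x == 1)
              = l.countP (fun x => cl.count x == 1) := by simp [h1]
          have hnd : pvND cl (y :: l) f = y :: pvND cl l (f ++ [y]) := by
            rw [pvND, if_pos h2]
          rw [List.foldl_cons, hstep, ih, hcp, hnd]
          refine Prod.ext rfl (Prod.ext ?_ ?_)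
          · show i + 1 + ((pvND cl l (f ++ [y])).length : Int)
              = i + ((y :: pvND cl l (f ++ [y])).length : Int)
            simp only [List.length_cons]
            push_cast
            ring
          · show (f ++ [y]) ++ pvND cl l (f ++ [y]) = f ++ (y :: pvND cl l (f ++ [y]))
            simp
        · have hstep : pvStepA cl (u, i, f) y = (u, i, f) := by
            simp only [pvStepA, h1, Bool.false_eq_true, if_false]
            rw [if_neg h2]
          have hcp : (y :: l).countP (fun x => cl.count x == 1)
              = l.countP (fun x => cl.count x == 1) := by simp [h1]
          have hnd : pvND cl (y :: l) f = pvND cl l f := by rw [pvND, if_neg h2]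
          rw [List.foldl_cons, hstep, ih, hcp, hnd]

-- Characterisation of B's loop over the counter's values.
theorem pvLoopB : ∀ (vs : List Int) (u i : Int),
    vs.foldl pvStepB (u, i)
    = (u + (vs.countP (fun c => c == 1) : Int), i + (vs.countP (fun c => c != 1) : Int)) := by
  intro vs
  induction vs with
  | nil => intro u i; simp
  | cons c vs ih =>
      intro u i
      by_cases h : (c == 1) = true
      · have hstep : pvStepB (u, i) c = (u + 1, i) := by simp [pvStepB, h]
        have hcp1 : (c :: vs).countP (fun c => c == (1 : Int))
            = vs.countP (fun c => c == (1 : Int)) + 1 := by simp [h]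
        have hcp2 : (c :: vs).countP (fun c => c != (1 : Int))
            = vs.countP (fun c => c != (1 : Int)) := by simp [beq_iff_eq.mp h]
        rw [List.foldl_cons, hstep, ih, hcp1, hcp2]
        exact Prod.ext (by push_cast; ring) rfl
      · have hstep : pvStepB (u, i) c = (u, i + 1) := by simp [pvStepB, h]
        have hcp1 : (c :: vs).countP (fun c => c == (1 : Int))
            = vs.countP (fun c => c == (1 : Int)) := by simp [h]
        have hcp2 : (c :: vs).countP (fun c => c != (1 : Int))
            = vs.countP (fun c => c != (1 : Int)) + 1 := by
          simp only [List.countP_cons, bne_iff_ne, ne_eq]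
          simp [show ¬c = 1 by simpa using h]
        rw [List.foldl_cons, hstep, ih, hcp1, hcp2]
        exact Prod.ext rfl (by push_cast; ring)

-- Two nodup lists with the same members have the same length.
theorem pvLenEq {l1 l2 : List String} (h1 : l1.Nodup) (h2 : l2.Nodup)
    (hm : ∀ x, x ∈ l1 ↔ x ∈ l2) : l1.length = l2.length := by
  rw [← List.toFinset_card_of_nodup h1, ← List.toFinset_card_of_nodup h2]
  congr 1
  ext x
  simp [hm]

-- Positional count of count-1 elements equals the number of distinct count-1 elements.
theorem pvBridge1 (cl : List String) :
    cl.countP (fun x => cl.count x == 1)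
    = (PySem.Set.ofList cl).countP (fun x => cl.count x == 1) := by
  rw [List.countP_eq_length_filter, List.countP_eq_length_filter]
  apply pvLenEq
  · rw [List.nodup_iff_count]
    intro a
    by_cases hp : (cl.count a == 1) = true
    · rw [List.count_filter (p := fun x => cl.count x == 1) hp]
      exact le_of_eq (beq_iff_eq.mp hp)
    · rw [List.count_eq_zero_of_not_mem]
      · omega
      · intro hmem
        exact hp (List.mem_filter.mp hmem).2
  · exact List.Nodup.filter _ (PySem.Set.nodup_ofList cl)
  · intro x
    simp [List.mem_filter, PySem.Set.mem_ofList]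

theorem pvBridge2 (cl : List String) :
    ((pvND cl cl []).length : Int)
    = ((PySem.Set.ofList cl).countP (fun x => cl.count x != 1) : Int) := by
  congr 1
  rw [List.countP_eq_length_filter]
  apply pvLenEq (pvND_nodup cl cl []) (List.Nodup.filter _ (PySem.Set.nodup_ofList cl))
  intro x
  rw [pvND_mem, List.mem_filter, PySem.Set.mem_ofList]
  simp [bne_iff_ne]

-- The Int-valued counter values have count == 1 exactly where the Nat count does.
theorem pvCast1 (cl : List String) :
    (PySem.Set.ofList cl).countP ((fun c => c == (1 : Int)) ∘ fun k => ((cl.count k : Nat) : Int))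
    = (PySem.Set.ofList cl).countP (fun x => cl.count x == 1) := by
  apply List.countP_congr
  intro x _
  simp only [Function.comp, beq_iff_eq]
  omega

theorem pvCast2 (cl : List String) :
    (PySem.Set.ofList cl).countP ((fun c => c != (1 : Int)) ∘ fun k => ((cl.count k : Nat) : Int))
    = (PySem.Set.ofList cl).countP (fun x => cl.count x != 1) := by
  apply List.countP_congr
  intro x _
  simp only [Function.comp, bne_iff_ne, ne_eq]
  omega

-- The whole computation, on the shared filtered list `cl`.
theorem pvMain (cl : List String) :
    ((cl.foldl (pvStepA cl) ((0 : Int), (0 : Int), ([] : List String))).1,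
     (cl.foldl (pvStepA cl) ((0 : Int), (0 : Int), ([] : List String))).2.1)
    = (PySem.Dict.counter cl).values.foldl pvStepB ((0 : Int), (0 : Int)) := by
  have hvals : (PySem.Dict.counter cl).values
      = (PySem.Set.ofList cl).map (fun k => ((cl.count k : Nat) : Int)) := by
    show ((PySem.Dict.counter cl).items.map (·.2)) = _
    rw [PySem.Dict.items_counter, List.map_map]
    simp [Function.comp]
  rw [pvLoopA, hvals, pvLoopB, List.countP_map, List.countP_map, pvCast1, pvCast2,
    ← pvBridge1, ← pvBridge2]

-- B's dict-building loop is exactly the counter of the filtered value list.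
theorem pvCounts (codon_seqs : List (String × String)) (gappy_seqs post_stop_seqs : List String) :
    (PySem.Dict.ofList codon_seqs).items.foldl
      (fun d kv =>
        if !(PySem.Set.ofList (gappy_seqs ++ post_stop_seqs)).contains kv.1 then
          d.insert kv.2 (d.getD kv.2 0 + 1)
        else d)
      PySem.Dict.empty
    = PySem.Dict.counter
        (((PySem.Dict.ofList codon_seqs).items.filter
            (fun kv => !((gappy_seqs ++ post_stop_seqs).contains kv.1))).map (·.2)) := by
  have hb : ∀ kv : String × String,
      (PySem.Set.ofList (gappy_seqs ++ post_stop_seqs)).contains kv.1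
      = (gappy_seqs ++ post_stop_seqs).contains kv.1 := by
    intro kv
    simp only [List.contains_eq_mem]
    simp [PySem.Set.mem_ofList]
  simp only [hb]
  rw [← PySem.Dict.foldl_insert_getD_add_one_eq_counter, List.foldl_map, List.foldl_filter]

-- ===== VERDICT (by name: the statement is the Claim_ definition above) =====
theorem countUniqIdentSeqs_spec : Claim_equal_countUniqIdentSeqs := by
  intro codon_seqs gappy_seqs post_stop_seqs _
  unfold Spec_countUniqIdentSeqs
  simp only [countUniqIdentSeqs, countUniqIdentSeqs_alt]
  rw [pvCounts codon_seqs gappy_seqs post_stop_seqs]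
  exact pvMain _
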